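-- pv_equiv track=rewrite | github.com/jhofscheier/gen-flat-const-dim2 | Z_Delta2_triangles/pretty_concat/pretty_concat.py | str_to_rect
-- ===== SOURCE A (Python) =====
-- def str_to_rect(str_list, height=None, width=None, whitespace=' '):
--     """Transforms a list of strings into a list of strings of length width
--        (appending spaces to shorter lines). Inserts lines [whitespace*width]
--        above and below such that original strings are vertically centered.
--
--        (Think of returned list representing a rectangular multi-line string of
--        given width and height with addtional lines containing 'whitespace'.)
--
--     Args:
--       str_list: list of strings
--       height: integer giving number of strings in final list
--       width: integer giving the length of every string in final list
--       whitespace: character to use for addtional lines to add above/below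
--     """
--     n_lines = len(str_list)
--     max_line_len = max([len(x) for x in str_list])
--
--     width = width if width is not None else max_line_len
--     if width < max_line_len:
--         raise ValueError('str_to_rect: width must be greater than or equal'
--                          'to length of maximal line in mult_line_str')
--
--     height = height if height is not None else n_lines
--     if height < n_lines:
--         raise ValueError('str_to_rect: height must be greater than or euqal'
--                          'to number of lines in mult_line_str')
--
--     n_additional_lines = (height-n_lines)
--     n_above = n_additional_lines//2
--     n_below = (n_additional_lines+n_additional_lines % 2)//2
--
--     return [whitespace*width]*n_above + \
--         ['{0:<{1}}'.format(s, width) for s in str_list] + \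
--         [whitespace*width]*n_below
-- ===== SOURCE B (Python) =====
-- def str_to_rect(str_list, height=None, width=None, whitespace=' '):
--     """Pad strings to width and vertically center them in height.
--
--     Same validation as the original, but builds the result in one
--     index-driven pass over range(height) instead of concatenating
--     three separately built lists.
--     """
--     n_lines = len(str_list)
--     max_line_len = max([len(x) for x in str_list])
--
--     width = width if width is not None else max_line_len
--     if width < max_line_len:
--         raise ValueError('str_to_rect: width must be greater than or equal'
--                          'to length of maximal line in mult_line_str')
--
--     height = height if height is not None else n_lines
--     if height < n_lines:
--         raise ValueError('str_to_rect: height must be greater than or euqal'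
--                          'to number of lines in mult_line_str')
--
--     n_above = (height - n_lines) // 2
--     blank = whitespace * width
--     return [blank if i < n_above or i >= n_above + n_lines
--             else str_list[i - n_above] + ' ' * (width - len(str_list[i - n_above]))
--             for i in range(height)]
-- ===== Notes on version B (the rewrite author's own statement) =====
-- stated objective: alternative
-- what changed: Replaces the three separately built lists (blank rows above, padded lines, blank rows below) and their concatenation by a single index-driven pass over range(height) that classifies each row index into the blank/content regions and pads content lines arithmetically instead of via a format spec.
import Mathlib
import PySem

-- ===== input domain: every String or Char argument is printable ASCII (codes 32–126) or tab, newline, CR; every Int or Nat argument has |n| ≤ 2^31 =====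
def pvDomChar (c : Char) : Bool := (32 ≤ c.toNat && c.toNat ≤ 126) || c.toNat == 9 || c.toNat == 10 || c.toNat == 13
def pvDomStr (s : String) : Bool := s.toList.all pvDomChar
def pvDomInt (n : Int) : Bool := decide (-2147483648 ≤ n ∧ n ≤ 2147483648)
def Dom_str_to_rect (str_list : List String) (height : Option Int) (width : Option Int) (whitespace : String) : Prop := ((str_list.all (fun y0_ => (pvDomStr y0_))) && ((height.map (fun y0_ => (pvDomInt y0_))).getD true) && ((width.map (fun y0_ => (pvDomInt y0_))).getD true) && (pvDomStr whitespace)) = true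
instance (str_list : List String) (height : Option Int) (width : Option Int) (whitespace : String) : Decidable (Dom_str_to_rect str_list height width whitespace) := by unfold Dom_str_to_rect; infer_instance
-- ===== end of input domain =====

-- B builds the rectangle in one index-driven pass over range(height) instead of
-- concatenating three separately built lists (objective: alternative decomposition).


-- ===== PORT A =====
-- '{0:<{1}}'.format(s, w): left-justify with SPACES; a no-op when w ≤ len(s) ((w - len).toNat = 0)
def pyLjust (s : String) (w : Int) : String :=
  String.ofList (s.toList ++ List.replicate (w - (s.toList.length : Int)).toNat ' ')

def str_to_rect (str_list : List String) (height : Option Int) (width : Option Int) (whitespace : String) : List String :=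
  let n_lines : Int := PySem.List.len str_list
  -- max([len(x) for x in str_list]); on [] Python raises ValueError — excluded by Pre_
  let max_line_len : Int := (PySem.List.max? (str_list.map PySem.Str.len) (fun x => x)).getD 0
  let width' := width.getD max_line_len
  -- 'if width < max_line_len: raise ValueError' — excluded by Pre_
  let height' := height.getD n_lines
  -- 'if height < n_lines: raise ValueError' — excluded by Pre_
  let n_additional_lines := height' - n_lines
  let n_above := PySem.Int.floordiv n_additional_lines 2
  let n_below := PySem.Int.floordiv (n_additional_lines + PySem.Int.mod n_additional_lines 2) 2
  -- [whitespace*width]*n_above + [format…] + [whitespace*width]*n_below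
  List.replicate n_above.toNat (String.ofList (PySem.List.pyRepeat whitespace.toList width')) ++
    str_list.map (fun s => pyLjust s width') ++
    List.replicate n_below.toNat (String.ofList (PySem.List.pyRepeat whitespace.toList width'))

-- ===== PORT B =====
def str_to_rect_alt (str_list : List String) (height : Option Int) (width : Option Int) (whitespace : String) : List String :=
  let n_lines : Int := PySem.List.len str_list
  let max_line_len : Int := (PySem.List.max? (str_list.map PySem.Str.len) (fun x => x)).getD 0
  let width' := width.getD max_line_len
  let height' := height.getD n_lines
  let n_above := PySem.Int.floordiv (height' - n_lines) 2
  let blank := String.ofList (PySem.List.pyRepeat whitespace.toList width')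
  -- one pass over range(height); str_list[i-n_above] is always in range on the
  -- evaluated (non-raising) path, so the default "" of pyGetD is never used there
  (PySem.List.pyRange 0 height' 1).map (fun i =>
    if i < n_above ∨ n_above + n_lines ≤ i then blank
    else
      let s := PySem.List.pyGetD str_list (i - n_above) ""
      String.ofList (s.toList ++ List.replicate (width' - (s.toList.length : Int)).toNat ' '))

-- ===== PRECONDITION & SPEC =====
-- Pre_ excludes exactly the inputs where A raises ValueError: the empty list (max([])),
-- a given width smaller than the longest line, and a given height smaller than len(str_list).
def Pre_str_to_rect (str_list : List String) (height : Option Int) (width : Option Int) (whitespace : String) : Prop :=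
  str_list ≠ [] ∧
  (∀ s ∈ str_list, PySem.Str.len s ≤ width.getD (PySem.Str.len s)) ∧
  PySem.List.len str_list ≤ height.getD (PySem.List.len str_list)
instance (str_list : List String) (height : Option Int) (width : Option Int) (whitespace : String) : Decidable (Pre_str_to_rect str_list height width whitespace) := by unfold Pre_str_to_rect; infer_instance

def pvWitness_str_to_rect : List String × Option Int × Option Int × String := (["ab", "c"], some 5, some 4, " ")

def Spec_str_to_rect (str_list : List String) (height : Option Int) (width : Option Int) (whitespace : String) (out : List String) : Prop := out = str_to_rect_alt str_list height width whitespace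
instance (str_list : List String) (height : Option Int) (width : Option Int) (whitespace : String) (out : List String) : Decidable (Spec_str_to_rect str_list height width whitespace out) := by unfold Spec_str_to_rect; infer_instance

-- ===== CLAIM (what is proved, stated in full; the proofs are below) =====
def Claim_equal_str_to_rect : Prop := ∀ (str_list : List String) (height : Option Int) (width : Option Int) (whitespace : String), Dom_str_to_rect str_list height width whitespace → Pre_str_to_rect str_list height width whitespace → Spec_str_to_rect str_list height width whitespace (str_to_rect str_list height width whitespace)

-- ===== LEMMAS AND PROOFS =====

-- the index-driven pass over range(h) rebuilds the three regions of A's concatenation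
theorem pyBuild_eq (xs : List String) (blank : String) (pad : String → String) (a b h : Int)
    (ha : 0 ≤ a) (hb : 0 ≤ b) (hh : h = a + (xs.length : Int) + b) :
    (PySem.List.pyRange 0 h 1).map (fun i =>
        if i < a ∨ a + (PySem.List.len xs) ≤ i then blank
        else pad (PySem.List.pyGetD xs (i - a) "")) =
      List.replicate a.toNat blank ++ xs.map pad ++ List.replicate b.toNat blank := by
  have hn : PySem.List.len xs = (xs.length : Int) := PySem.List.len_eq xs
  rw [PySem.List.pyRange_one_append 0 a h ha (by omega),
      PySem.List.pyRange_one_append a (a + (xs.length : Int)) h (by omega) (by omega),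
      List.map_append, List.map_append]
  have H1 : (PySem.List.pyRange 0 a).map (fun i =>
      if i < a ∨ a + (PySem.List.len xs) ≤ i then blank
      else pad (PySem.List.pyGetD xs (i - a) "")) = List.replicate a.toNat blank := by
    rw [List.eq_replicate_iff]
    refine ⟨by rw [List.length_map, PySem.List.length_pyRange_one]; omega, ?_⟩
    intro y hy
    simp only [List.mem_map] at hy
    obtain ⟨i, hi, rfl⟩ := hy
    rw [PySem.List.mem_pyRange_one] at hi
    rw [if_pos (Or.inl hi.2)]
  have H2 : (PySem.List.pyRange a (a + (xs.length : Int))).map (fun i =>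
      if i < a ∨ a + (PySem.List.len xs) ≤ i then blank
      else pad (PySem.List.pyGetD xs (i - a) "")) = xs.map pad := by
    rw [PySem.List.pyRange_one a (a + (xs.length : Int)), List.map_map]
    have hlt : ((a + (xs.length : Int)) - a).toNat = xs.length := by omega
    rw [hlt]
    apply List.ext_getElem
    · simp
    · intro k hk1 hk2
      have hklen : k < xs.length := by
        rw [List.length_map] at hk2; exact hk2
      simp only [List.getElem_map, List.getElem_range, Function.comp]
      have hcond : ¬ ((a + (k : Int)) < a ∨ a + PySem.List.len xs ≤ a + (k : Int)) := by
        rw [hn]; omega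
      rw [if_neg hcond]
      have hidx : a + (k : Int) - a = ((k : Nat) : Int) := by omega
      rw [hidx, PySem.List.pyGetD_natCast, List.getD_eq_getElem xs "" hklen]
  have H3 : (PySem.List.pyRange (a + (xs.length : Int)) h).map (fun i =>
      if i < a ∨ a + (PySem.List.len xs) ≤ i then blank
      else pad (PySem.List.pyGetD xs (i - a) "")) = List.replicate b.toNat blank := by
    rw [List.eq_replicate_iff]
    refine ⟨by rw [List.length_map, PySem.List.length_pyRange_one]; omega, ?_⟩
    intro y hy
    simp only [List.mem_map] at hy
    obtain ⟨i, hi, rfl⟩ := hy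
    rw [PySem.List.mem_pyRange_one] at hi
    rw [if_pos (Or.inr (by rw [hn]; omega))]
  rw [H1, H2, H3, List.append_assoc]

-- ===== VERDICT (by name: the statement is the Claim_ definition above) =====
theorem str_to_rect_spec : Claim_equal_str_to_rect := by
  intro str_list height width whitespace _hdom hpre
  obtain ⟨hne, hwid, hht⟩ := hpre
  unfold Spec_str_to_rect
  have hnlen : PySem.List.len str_list = (str_list.length : Int) := PySem.List.len_eq str_list
  have hhn : PySem.List.len str_list ≤ height.getD (PySem.List.len str_list) := by
    cases height with
    | none => simp
    | some h0 => simpa using hht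
  have hd : 0 ≤ height.getD (PySem.List.len str_list) - PySem.List.len str_list := by omega
  have ha : 0 ≤ PySem.Int.floordiv (height.getD (PySem.List.len str_list) - PySem.List.len str_list) 2 := by
    rw [PySem.Int.floordiv_eq_ediv_of_pos (by norm_num)]; omega
  have hb : 0 ≤ PySem.Int.floordiv ((height.getD (PySem.List.len str_list) - PySem.List.len str_list) +
      PySem.Int.mod (height.getD (PySem.List.len str_list) - PySem.List.len str_list) 2) 2 := by
    rw [PySem.Int.floordiv_eq_ediv_of_pos (by norm_num),
        PySem.Int.mod_eq_emod_of_pos (by norm_num)]; omega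
  have hsum : height.getD (PySem.List.len str_list) =
      PySem.Int.floordiv (height.getD (PySem.List.len str_list) - PySem.List.len str_list) 2 +
      (str_list.length : Int) +
      PySem.Int.floordiv ((height.getD (PySem.List.len str_list) - PySem.List.len str_list) +
        PySem.Int.mod (height.getD (PySem.List.len str_list) - PySem.List.len str_list) 2) 2 := by
    rw [PySem.Int.floordiv_eq_ediv_of_pos (by norm_num),
        PySem.Int.floordiv_eq_ediv_of_pos (by norm_num),
        PySem.Int.mod_eq_emod_of_pos (by norm_num)]
    omega
  exact (pyBuild_eq str_list
      (String.ofList (PySem.List.pyRepeat whitespace.toList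
        (width.getD ((PySem.List.max? (str_list.map PySem.Str.len) (fun x => x)).getD 0))))
      (fun s => pyLjust s (width.getD ((PySem.List.max? (str_list.map PySem.Str.len) (fun x => x)).getD 0)))
      _ _ _ ha hb hsum).symm
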